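-- pv_equiv track=rewrite | github.com/MrBrantCode/unitest_baseline | mut_generate/mist_train_taco/taco_16557/solution.py | count_enclosed_land_cells
-- ===== SOURCE A (Python) =====
-- from typing import List
--
-- def count_enclosed_land_cells(grid: List[List[int]]) -> int:
--     num_ones = 0
--     ones = []
--     visited = set()
--     n = len(grid)
--     m = len(grid[0])
--
--     # Count all land cells and mark boundary land cells
--     for i in range(n):
--         for j in range(m):
--             if grid[i][j] == 1:
--                 num_ones += 1
--                 if i == 0 or i == n - 1 or j == 0 or j == m - 1:
--                     ones.append((i, j))
--                     visited.add((i, j))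
--
--     # Traverse from boundary land cells and mark reachable land cells
--     while ones:
--         x = ones.pop(0)
--         num_ones -= 1
--         a1, a2 = x
--
--         # Check adjacent cells
--         for dx, dy in [(-1, 0), (1, 0), (0, -1), (0, 1)]:
--             ni, nj = a1 + dx, a2 + dy
--             if 0 <= ni < n and 0 <= nj < m and grid[ni][nj] == 1 and (ni, nj) not in visited:
--                 ones.append((ni, nj))
--                 visited.add((ni, nj))
--
--     return num_ones
-- ===== SOURCE B (Python) =====
-- def count_enclosed_land_cells(grid):
--     n = len(grid)
--     m = len(grid[0])
--
--     def land(i, j):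
--         return 0 <= i < n and 0 <= j < m and grid[i][j] == 1
--
--     # start from the boundary land cells, then saturate: repeatedly sweep the
--     # whole grid, adding every land cell adjacent to an already-safe cell,
--     # until a sweep adds nothing
--     safe = {(i, j) for i in range(n) for j in range(m)
--             if land(i, j) and (i == 0 or i == n - 1 or j == 0 or j == m - 1)}
--     while True:
--         grown = {(i, j) for i in range(n) for j in range(m)
--                  if land(i, j) and ((i, j) in safe or (i - 1, j) in safe
--                                     or (i + 1, j) in safe or (i, j - 1) in safe
--                                     or (i, j + 1) in safe)}
--         if len(grown) == len(safe):
--             break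
--         safe = grown
--     return sum(1 for i in range(n) for j in range(m)
--                if land(i, j) and (i, j) not in safe)
-- ===== Notes on version B (the rewrite author's own statement) =====
-- stated objective: alternative
-- what changed: Replaces A's single BFS (FIFO queue with visited-set and a live decrementing counter) by whole-grid saturation: start from the boundary land cells and repeatedly re-sweep the entire grid adding land cells adjacent to safe ones until a sweep adds nothing, then count land cells left unsafe in one final pass.
import Mathlib
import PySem

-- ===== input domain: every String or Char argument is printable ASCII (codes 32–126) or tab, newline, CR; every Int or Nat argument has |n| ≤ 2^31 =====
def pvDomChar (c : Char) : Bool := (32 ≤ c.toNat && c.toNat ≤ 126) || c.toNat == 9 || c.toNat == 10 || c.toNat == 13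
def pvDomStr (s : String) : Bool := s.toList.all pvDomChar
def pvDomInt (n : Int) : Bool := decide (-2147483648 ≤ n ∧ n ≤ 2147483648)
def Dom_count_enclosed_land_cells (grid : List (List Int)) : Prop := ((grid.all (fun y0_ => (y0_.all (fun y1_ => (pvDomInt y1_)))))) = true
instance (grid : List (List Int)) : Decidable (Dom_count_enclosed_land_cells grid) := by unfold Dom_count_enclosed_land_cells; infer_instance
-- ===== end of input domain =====

-- B replaces A's queue-based BFS by repeated whole-grid saturation sweeps plus a final
-- counting pass (a different decomposition of the same count; not claimed faster).

-- ===== PORT A =====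
-- grid[i][j] == 1 (false where Python would raise IndexError; such inputs are outside Pre_)
def aGet1 (grid : List (List Int)) (i j : Int) : Bool :=
  match PySem.List.pyGet? grid i with
  | some row => PySem.List.pyGet? row j == some 1
  | none => false
-- the 'while ones:' BFS loop; the fuel argument only makes the recursion total
def bfsA (grid : List (List Int)) (n m : Int) :
    Nat → Int → List (Int × Int) → PySem.Set (Int × Int) → Int
  | 0, num, _, _ => num
  | fuel+1, num, ones, visited =>
    match ones with
    | [] => num
    | x :: rest =>
      let st := [((-1 : Int), (0 : Int)), (1, 0), (0, -1), (0, 1)].foldl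
        (fun (st : List (Int × Int) × PySem.Set (Int × Int)) d =>
          let ni := x.1 + d.1
          let nj := x.2 + d.2
          if decide (0 ≤ ni) && decide (ni < n) && decide (0 ≤ nj) && decide (nj < m)
              && aGet1 grid ni nj && !(PySem.Set.contains st.2 (ni, nj)) then
            (st.1 ++ [(ni, nj)], PySem.Set.add st.2 (ni, nj))
          else st) (rest, visited)
      bfsA grid n m fuel (num - 1) st.1 st.2

def count_enclosed_land_cells (grid : List (List Int)) : Int :=
  match PySem.List.pyGet? grid 0 with
  | none => 0
  | some row0 =>
    let n : Int := grid.length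
    let m : Int := row0.length
    let init :=
      (PySem.List.pyRange 0 n 1).foldl (fun st i =>
        (PySem.List.pyRange 0 m 1).foldl
          (fun (st : Int × List (Int × Int) × PySem.Set (Int × Int)) j =>
            if aGet1 grid i j then
              let st := (st.1 + 1, st.2.1, st.2.2)
              if i = 0 ∨ i = n - 1 ∨ j = 0 ∨ j = m - 1 then
                (st.1, st.2.1 ++ [(i, j)], PySem.Set.add st.2.2 (i, j))
              else st
            else st) st)
        ((0 : Int), ([] : List (Int × Int)), (PySem.Set.empty : PySem.Set (Int × Int)))
    bfsA grid n m (n.toNat * m.toNat + 1) init.1 init.2.1 init.2.2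


-- ===== PORT B =====
-- [(i, j) for i in range(n) for j in range(m)]
def allCellsB (n m : Int) : List (Int × Int) :=
  (PySem.List.pyRange 0 n 1).flatMap (fun i => (PySem.List.pyRange 0 m 1).map (fun j => (i, j)))

-- B's land(i, j) helper (false where Python would raise IndexError; outside Pre_)
def landB (grid : List (List Int)) (n m : Int) (c : Int × Int) : Bool :=
  decide (0 ≤ c.1) && decide (c.1 < n) && decide (0 ≤ c.2) && decide (c.2 < m) &&
  (match PySem.List.pyGet? grid c.1 with
   | some row => PySem.List.pyGet? row c.2 == some 1
   | none => false)
-- one whole-grid sweep: the 'grown' set comprehension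
def sweepB (grid : List (List Int)) (n m : Int) (safe : PySem.Set (Int × Int)) :
    PySem.Set (Int × Int) :=
  PySem.Set.ofList ((allCellsB n m).filter (fun c =>
    landB grid n m c && (PySem.Set.contains safe c
      || PySem.Set.contains safe (c.1 - 1, c.2) || PySem.Set.contains safe (c.1 + 1, c.2)
      || PySem.Set.contains safe (c.1, c.2 - 1) || PySem.Set.contains safe (c.1, c.2 + 1))))

-- the 'while True:' saturation loop; the fuel argument only makes it total
def loopB (grid : List (List Int)) (n m : Int) :
    Nat → PySem.Set (Int × Int) → PySem.Set (Int × Int)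
  | 0, safe => safe
  | fuel+1, safe =>
    let grown := sweepB grid n m safe
    if grown.length = safe.length then safe else loopB grid n m fuel grown

def count_enclosed_land_cells_alt (grid : List (List Int)) : Int :=
  match PySem.List.pyGet? grid 0 with
  | none => 0
  | some row0 =>
    let n : Int := grid.length
    let m : Int := row0.length
    let safe0 := PySem.Set.ofList ((allCellsB n m).filter (fun c =>
      landB grid n m c && (c.1 == 0 || c.1 == n - 1 || c.2 == 0 || c.2 == m - 1)))
    let safe := loopB grid n m (n.toNat * m.toNat + 1) safe0
    (allCellsB n m).foldl (fun acc c =>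
      if landB grid n m c && !(PySem.Set.contains safe c) then acc + 1 else acc) (0 : Int)


-- ===== PRECONDITION & SPEC =====
-- Python A raises IndexError on an empty grid (grid[0]) and whenever some row is shorter
-- than row 0 (grid[i][j] in the first double loop raises); exactly those inputs are excluded.
def Pre_count_enclosed_land_cells (grid : List (List Int)) : Prop :=
  grid ≠ [] ∧ ∀ row ∈ grid, grid.headI.length ≤ row.length
instance (grid : List (List Int)) : Decidable (Pre_count_enclosed_land_cells grid) := by
  unfold Pre_count_enclosed_land_cells; infer_instance
def pvWitness_count_enclosed_land_cells : List (List Int) := [[1, 1, 0], [0, 1, 0], [0, 1, 1]]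
def Spec_count_enclosed_land_cells (grid : List (List Int)) (out : Int) : Prop := out = count_enclosed_land_cells_alt grid
instance (grid : List (List Int)) (out : Int) : Decidable (Spec_count_enclosed_land_cells grid out) := by unfold Spec_count_enclosed_land_cells; infer_instance

-- ===== CLAIM (what is proved, stated in full; the proofs are below) =====
def Claim_equal_count_enclosed_land_cells : Prop := ∀ (grid : List (List Int)), Dom_count_enclosed_land_cells grid → Pre_count_enclosed_land_cells grid → Spec_count_enclosed_land_cells grid (count_enclosed_land_cells grid)

-- ===== LEMMAS AND PROOFS =====

-- the four grid neighbours of a cell, in A's direction order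
def nbrs (c : Int × Int) : List (Int × Int) :=
  [(c.1 - 1, c.2), (c.1 + 1, c.2), (c.1, c.2 - 1), (c.1, c.2 + 1)]

lemma nbrs_symm {c d : Int × Int} (h : d ∈ nbrs c) : c ∈ nbrs d := by
  obtain ⟨c1, c2⟩ := c; obtain ⟨d1, d2⟩ := d
  simp only [nbrs, List.mem_cons, List.not_mem_nil, or_false, Prod.mk.injEq] at h ⊢
  rcases h with ⟨h1, h2⟩ | ⟨h1, h2⟩ | ⟨h1, h2⟩ | ⟨h1, h2⟩ <;> omega

-- cells connected to the boundary through land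
inductive Reach (grid : List (List Int)) (n m : Int) : Int × Int → Prop
  | seed (c : Int × Int) : landB grid n m c = true →
      (c.1 = 0 ∨ c.1 = n - 1 ∨ c.2 = 0 ∨ c.2 = m - 1) → Reach grid n m c
  | step (c d : Int × Int) : Reach grid n m c → d ∈ nbrs c →
      landB grid n m d = true → Reach grid n m d

lemma set_add_fresh {α : Type} [BEq α] [LawfulBEq α] (s : PySem.Set α) (x : α) (h : x ∉ s) :
    PySem.Set.add s x = s ++ [x] := by
  simp [PySem.Set.add, PySem.Set.contains_eq_listContains, h]
lemma set_mem_contains {α : Type} [BEq α] [LawfulBEq α] (s : PySem.Set α) (x : α) :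
    PySem.Set.contains s x = true ↔ x ∈ s := by
  simp [PySem.Set.contains_eq_listContains]

lemma landB_def (grid : List (List Int)) (n m : Int) (c : Int × Int) :
    landB grid n m c = (decide (0 ≤ c.1) && decide (c.1 < n) && decide (0 ≤ c.2)
      && decide (c.2 < m) && aGet1 grid c.1 c.2) := by
  simp [landB, aGet1]


lemma landB_eq_aGet1 {grid : List (List Int)} {n m : Int} {c : Int × Int}
    (h1 : 0 ≤ c.1) (h2 : c.1 < n) (h3 : 0 ≤ c.2) (h4 : c.2 < m) :
    landB grid n m c = aGet1 grid c.1 c.2 := by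
  simp only [landB, aGet1, h1, h2, h3, h4, decide_true, Bool.true_and]

lemma land_inRange {grid : List (List Int)} {n m : Int} {c : Int × Int}
    (h : landB grid n m c = true) : 0 ≤ c.1 ∧ c.1 < n ∧ 0 ≤ c.2 ∧ c.2 < m := by
  simp only [landB, Bool.and_eq_true, decide_eq_true_eq] at h
  exact ⟨h.1.1.1.1, h.1.1.1.2, h.1.1.2, h.1.2⟩

lemma mem_allCellsB {n m : Int} {c : Int × Int} :
    c ∈ allCellsB n m ↔ 0 ≤ c.1 ∧ c.1 < n ∧ 0 ≤ c.2 ∧ c.2 < m := by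
  obtain ⟨c1, c2⟩ := c
  simp only [allCellsB, List.mem_flatMap, List.mem_map, PySem.List.mem_pyRange_one,
    Prod.mk.injEq]
  constructor
  · rintro ⟨i, ⟨hi1, hi2⟩, j, ⟨hj1, hj2⟩, he1, he2⟩; subst he1; subst he2
    exact ⟨hi1, hi2, hj1, hj2⟩
  · rintro ⟨h1, h2, h3, h4⟩; exact ⟨c1, ⟨h1, h2⟩, c2, ⟨h3, h4⟩, rfl, rfl⟩

lemma nodup_allCellsB {n m : Int} : (allCellsB n m).Nodup := by
  rw [allCellsB, List.nodup_flatMap]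
  constructor
  · intro i _
    exact (PySem.List.nodup_pyRange_one 0 m).map (fun a b hab => (Prod.mk.injEq .. ▸ hab).2)
  · have h := PySem.List.nodup_pyRange_one 0 n
    rw [List.Nodup] at h
    refine h.imp ?_
    intro a b hab x hx hy
    simp only [List.mem_map] at hx hy
    obtain ⟨j1, _, hj1⟩ := hx; obtain ⟨j2, _, hj2⟩ := hy
    rw [← hj1] at hj2
    exact hab (congrArg Prod.fst hj2).symm

lemma length_allCellsB {n m : Int} : (allCellsB n m).length = n.toNat * m.toNat := by
  simp [allCellsB, List.length_flatMap, PySem.List.length_pyRange_one,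
    List.map_const', List.sum_replicate, smul_eq_mul]

lemma land_sub_bound {grid : List (List Int)} {n m : Int} {v : List (Int × Int)}
    (hnd : v.Nodup) (hl : ∀ c ∈ v, landB grid n m c = true) :
    v.length ≤ n.toNat * m.toNat := by
  have hsub : v ⊆ allCellsB n m := by
    intro c hc
    exact mem_allCellsB.mpr (land_inRange (hl c hc))
  calc v.length ≤ (allCellsB n m).length := (List.subperm_of_subset hnd hsub).length_le
    _ = n.toNat * m.toNat := length_allCellsB

lemma dirs_nbrs (x d : Int × Int) (hd : d ∈ [((-1:Int),(0:Int)),(1,0),(0,-1),(0,1)]) :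
    (x.1 + d.1, x.2 + d.2) ∈ nbrs x := by
  fin_cases hd <;> simp [nbrs, sub_eq_add_neg]

lemma nbrs_dirs (x e : Int × Int) (he : e ∈ nbrs x) :
    ∃ d ∈ [((-1:Int),(0:Int)),(1,0),(0,-1),(0,1)], e = (x.1 + d.1, x.2 + d.2) := by
  simp only [nbrs, List.mem_cons, List.not_mem_nil, or_false] at he
  simp only [List.mem_cons, List.not_mem_nil, or_false, exists_eq_or_imp, exists_eq_left]
  rcases he with rfl | rfl | rfl | rfl <;> simp [Prod.ext_iff] <;> omega

lemma innerA (grid : List (List Int)) (n m : Int) (x : Int × Int) :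
    ∀ (dirs : List (Int × Int)) (q v : List (Int × Int)), v.Nodup →
    ∃ new : List (Int × Int),
    (dirs.foldl (fun (st : List (Int × Int) × PySem.Set (Int × Int)) d =>
        let ni := x.1 + d.1
        let nj := x.2 + d.2
        if decide (0 ≤ ni) && decide (ni < n) && decide (0 ≤ nj) && decide (nj < m)
            && aGet1 grid ni nj && !(PySem.Set.contains st.2 (ni, nj)) then
          (st.1 ++ [(ni, nj)], PySem.Set.add st.2 (ni, nj))
        else st) (q, v)) = (q ++ new, v ++ new) ∧
    (v ++ new).Nodup ∧
    (∀ c ∈ new, c ∉ v ∧ landB grid n m c = true ∧ ∃ d ∈ dirs, c = (x.1 + d.1, x.2 + d.2)) ∧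
    (∀ d ∈ dirs, landB grid n m (x.1 + d.1, x.2 + d.2) = true →
      (x.1 + d.1, x.2 + d.2) ∈ v ++ new) := by
  intro dirs
  induction dirs with
  | nil =>
    intro q v hv
    exact ⟨[], by simp, by simpa using hv, by simp, by simp⟩
  | cons d ds ih =>
    intro q v hv
    rw [List.foldl_cons]
    have hsplit : (decide (0 ≤ x.1 + d.1) && decide (x.1 + d.1 < n) && decide (0 ≤ x.2 + d.2)
        && decide (x.2 + d.2 < m) && aGet1 grid (x.1 + d.1) (x.2 + d.2)
        && !(PySem.Set.contains v (x.1 + d.1, x.2 + d.2)))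
        = (landB grid n m (x.1 + d.1, x.2 + d.2)
            && !(PySem.Set.contains v (x.1 + d.1, x.2 + d.2))) := by
      rw [landB_def]
    by_cases hland : landB grid n m (x.1 + d.1, x.2 + d.2) = true
    · by_cases hmem : (x.1 + d.1, x.2 + d.2) ∈ v
      · have hcont := (set_mem_contains v _).mpr hmem
        have hcond : (decide (0 ≤ x.1 + d.1) && decide (x.1 + d.1 < n) && decide (0 ≤ x.2 + d.2)
            && decide (x.2 + d.2 < m) && aGet1 grid (x.1 + d.1) (x.2 + d.2)
            && !(PySem.Set.contains v (x.1 + d.1, x.2 + d.2))) = false := by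
          rw [hsplit, hcont]; simp
        simp only [hcond, Bool.false_eq_true, if_false]
        obtain ⟨new, he, hnd, hprop, hcov⟩ := ih q v hv
        refine ⟨new, he, hnd, ?_, ?_⟩
        · intro c hcnew
          obtain ⟨h1, h2, d', hd', h3⟩ := hprop c hcnew
          exact ⟨h1, h2, d', List.mem_cons_of_mem _ hd', h3⟩
        · intro d' hd'
          rcases List.mem_cons.mp hd' with h | h
          · subst h; intro _; exact List.mem_append_left _ hmem
          · exact hcov d' h
      · have hcont : PySem.Set.contains v (x.1 + d.1, x.2 + d.2) = false := by
          rw [← Bool.not_eq_true, set_mem_contains]; exact hmem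
        have hcond : (decide (0 ≤ x.1 + d.1) && decide (x.1 + d.1 < n) && decide (0 ≤ x.2 + d.2)
            && decide (x.2 + d.2 < m) && aGet1 grid (x.1 + d.1) (x.2 + d.2)
            && !(PySem.Set.contains v (x.1 + d.1, x.2 + d.2))) = true := by
          rw [hsplit, hcont, hland]; simp
        simp only [hcond, if_true]
        rw [set_add_fresh v _ hmem]
        have hv' : (v ++ [(x.1 + d.1, x.2 + d.2)]).Nodup := by
          simp only [List.nodup_append, List.nodup_singleton, true_and]
          refine ⟨hv, ?_⟩
          intro a ha b hb
          rcases List.mem_singleton.mp hb with rfl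
          intro hcontra; subst hcontra; exact hmem ha
        obtain ⟨new, he, hnd, hprop, hcov⟩ := ih (q ++ [(x.1 + d.1, x.2 + d.2)]) _ hv'
        refine ⟨(x.1 + d.1, x.2 + d.2) :: new, ?_, ?_, ?_, ?_⟩
        · rw [he]; simp
        · simpa using hnd
        · intro c hcnew
          rcases List.mem_cons.mp hcnew with h | h
          · subst h; exact ⟨hmem, hland, d, List.mem_cons_self, rfl⟩
          · obtain ⟨h1, h2, d', hd', h3⟩ := hprop c h
            refine ⟨fun hcv => h1 (List.mem_append_left _ hcv), h2, d',
              List.mem_cons_of_mem _ hd', h3⟩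
        · intro d' hd'
          rcases List.mem_cons.mp hd' with h | h
          · subst h; intro _; simp
          · intro hl
            have := hcov d' h hl
            simpa using this
    · have hcond : (decide (0 ≤ x.1 + d.1) && decide (x.1 + d.1 < n) && decide (0 ≤ x.2 + d.2)
          && decide (x.2 + d.2 < m) && aGet1 grid (x.1 + d.1) (x.2 + d.2)
          && !(PySem.Set.contains v (x.1 + d.1, x.2 + d.2))) = false := by
        rw [hsplit]
        rw [Bool.not_eq_true] at hland
        rw [hland]; simp
      simp only [hcond, Bool.false_eq_true, if_false]
      obtain ⟨new, he, hnd, hprop, hcov⟩ := ih q v hv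
      refine ⟨new, he, hnd, ?_, ?_⟩
      · intro c hcnew
        obtain ⟨h1, h2, d', hd', h3⟩ := hprop c hcnew
        exact ⟨h1, h2, d', List.mem_cons_of_mem _ hd', h3⟩
      · intro d' hd'
        rcases List.mem_cons.mp hd' with h | h
        · subst h; intro hl; exact absurd hl hland
        · exact hcov d' h

lemma bfsA_spec (grid : List (List Int)) (n m : Int) :
    ∀ (fuel : Nat) (num : Int) (q v : List (Int × Int)),
    v.Nodup →
    (∀ c ∈ v, landB grid n m c = true ∧ Reach grid n m c) →
    (∀ c ∈ q, c ∈ v) →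
    (∀ c ∈ v, c ∉ q → ∀ d ∈ nbrs c, landB grid n m d = true → d ∈ v) →
    q.length + n.toNat * m.toNat ≤ fuel + v.length →
    ∃ w : List (Int × Int), w.Nodup ∧
      (∀ c ∈ w, landB grid n m c = true ∧ Reach grid n m c) ∧
      (∀ c ∈ v, c ∈ w) ∧
      (∀ c ∈ w, ∀ d ∈ nbrs c, landB grid n m d = true → d ∈ w) ∧
      bfsA grid n m fuel num q v = num - (w.length : Int) + (v.length : Int) - (q.length : Int) := by
  intro fuel
  induction fuel with
  | zero =>
    intro num q v hvnd hvlr hqv hcl hfuel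
    have hvb : v.length ≤ n.toNat * m.toNat := land_sub_bound hvnd (fun c hc => (hvlr c hc).1)
    have hq : q = [] := List.length_eq_zero_iff.mp (by omega)
    subst hq
    refine ⟨v, hvnd, hvlr, fun c hc => hc, fun c hc => hcl c hc (by simp), ?_⟩
    simp [bfsA]
  | succ fuel ih =>
    intro num q v hvnd hvlr hqv hcl hfuel
    match q with
    | [] =>
      refine ⟨v, hvnd, hvlr, fun c hc => hc, fun c hc => hcl c hc (by simp), ?_⟩
      simp [bfsA]
    | x :: rest =>
      have hxv : x ∈ v := hqv x List.mem_cons_self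
      obtain ⟨new, heq, hnd', hprop, hcov⟩ :=
        innerA grid n m x [((-1 : Int), (0 : Int)), (1, 0), (0, -1), (0, 1)] rest v hvnd
      have hstep : bfsA grid n m (fuel + 1) num (x :: rest) v
          = bfsA grid n m fuel (num - 1) (rest ++ new) (v ++ new) := by
        conv_lhs => rw [bfsA]
        rw [heq]
      have hnewlr : ∀ c ∈ new, landB grid n m c = true ∧ Reach grid n m c := by
        intro c hc
        obtain ⟨hcv, hcl2, d, hd, hce⟩ := hprop c hc
        refine ⟨hcl2, ?_⟩
        have : c ∈ nbrs x := hce ▸ dirs_nbrs x d hd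
        exact Reach.step x c (hvlr x hxv).2 this hcl2
      have hvlr' : ∀ c ∈ v ++ new, landB grid n m c = true ∧ Reach grid n m c := by
        intro c hc
        rcases List.mem_append.mp hc with h | h
        · exact hvlr c h
        · exact hnewlr c h
      have hqv' : ∀ c ∈ rest ++ new, c ∈ v ++ new := by
        intro c hc
        rcases List.mem_append.mp hc with h | h
        · exact List.mem_append_left _ (hqv c (List.mem_cons_of_mem _ h))
        · exact List.mem_append_right _ h
      have hcl' : ∀ c ∈ v ++ new, c ∉ rest ++ new →
          ∀ d ∈ nbrs c, landB grid n m d = true → d ∈ v ++ new := by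
        intro c hc hcq d hd hld
        rcases List.mem_append.mp hc with h | h
        · by_cases hcx : c = x
          · subst hcx
            obtain ⟨d', hd', he⟩ := nbrs_dirs c d hd
            rw [he]
            exact hcov d' hd' (he ▸ hld)
          · have hcq2 : c ∉ x :: rest := by
              intro hmem
              rcases List.mem_cons.mp hmem with h2 | h2
              · exact hcx h2
              · exact hcq (List.mem_append_left _ h2)
            exact List.mem_append_left _ (hcl c h hcq2 d hd hld)
        · exact absurd (List.mem_append_right _ h) hcq
      have hfuel' : (rest ++ new).length + n.toNat * m.toNat ≤ fuel + (v ++ new).length := by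
        simp only [List.length_append]
        simp only [List.length_cons] at hfuel
        omega
      obtain ⟨w, hwnd, hwlr, hvw, hwcl, hweq⟩ :=
        ih (num - 1) (rest ++ new) (v ++ new) hnd' hvlr' hqv' hcl' hfuel'
      refine ⟨w, hwnd, hwlr, fun c hc => hvw c (List.mem_append_left _ hc), hwcl, ?_⟩
      rw [hstep, hweq]
      simp only [List.length_append, List.length_cons]
      push_cast
      ring

lemma mem_sweepB {grid : List (List Int)} {n m : Int} {safe : PySem.Set (Int × Int)}
    {c : Int × Int} :
    c ∈ sweepB grid n m safe ↔
      c ∈ allCellsB n m ∧ landB grid n m c = true ∧ (c ∈ safe ∨ ∃ d ∈ nbrs c, d ∈ safe) := by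
  rw [sweepB, PySem.Set.mem_ofList, List.mem_filter]
  simp only [Bool.and_eq_true, Bool.or_eq_true, set_mem_contains, nbrs, List.mem_cons,
    List.not_mem_nil, or_false, exists_eq_or_imp, exists_eq_left]
  tauto

lemma sweepB_nodup {grid : List (List Int)} {n m : Int} {safe : PySem.Set (Int × Int)} :
    (sweepB grid n m safe).Nodup := PySem.Set.nodup_ofList _

lemma safe_sub_sweepB {grid : List (List Int)} {n m : Int} {safe : PySem.Set (Int × Int)}
    (hl : ∀ c ∈ safe, landB grid n m c = true) :
    ∀ c ∈ safe, c ∈ sweepB grid n m safe := by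
  intro c hc
  exact mem_sweepB.mpr ⟨mem_allCellsB.mpr (land_inRange (hl c hc)), hl c hc, Or.inl hc⟩

lemma loopB_spec (grid : List (List Int)) (n m : Int) :
    ∀ (fuel : Nat) (safe : List (Int × Int)),
    safe.Nodup →
    (∀ c ∈ safe, landB grid n m c = true ∧ Reach grid n m c) →
    (∀ c : Int × Int, landB grid n m c = true →
      (c.1 = 0 ∨ c.1 = n - 1 ∨ c.2 = 0 ∨ c.2 = m - 1) → c ∈ safe) →
    n.toNat * m.toNat + 1 ≤ fuel + safe.length →
    (loopB grid n m fuel safe).Nodup ∧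
    (∀ c ∈ loopB grid n m fuel safe, landB grid n m c = true ∧ Reach grid n m c) ∧
    (∀ c : Int × Int, landB grid n m c = true →
      (c.1 = 0 ∨ c.1 = n - 1 ∨ c.2 = 0 ∨ c.2 = m - 1) → c ∈ loopB grid n m fuel safe) ∧
    (∀ c : Int × Int, landB grid n m c = true →
      (∃ d ∈ nbrs c, d ∈ loopB grid n m fuel safe) → c ∈ loopB grid n m fuel safe) := by
  intro fuel
  induction fuel with
  | zero =>
    intro safe hnd hlr _ hfuel
    have := land_sub_bound hnd (fun c hc => (hlr c hc).1)
    omega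
  | succ fuel ih =>
    intro safe hnd hlr hseed hfuel
    have hland : ∀ c ∈ safe, landB grid n m c = true := fun c hc => (hlr c hc).1
    have hsub : ∀ c ∈ safe, c ∈ sweepB grid n m safe := safe_sub_sweepB hland
    have hsubperm := List.subperm_of_subset hnd hsub
    by_cases hlen : (sweepB grid n m safe).length = safe.length
    · have hloop : loopB grid n m (fuel + 1) safe = safe := by
        rw [loopB]; simp [hlen]
      have hperm : safe.Perm (sweepB grid n m safe) :=
        List.Subperm.perm_of_length_le hsubperm (le_of_eq hlen)
      rw [hloop]
      refine ⟨hnd, hlr, hseed, ?_⟩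
      intro c hlc hex
      have : c ∈ sweepB grid n m safe :=
        mem_sweepB.mpr ⟨mem_allCellsB.mpr (land_inRange hlc), hlc, Or.inr hex⟩
      exact hperm.mem_iff.mpr this
    · have hloop : loopB grid n m (fuel + 1) safe
          = loopB grid n m fuel (sweepB grid n m safe) := by
        rw [loopB]; simp [hlen]
      have hglr : ∀ c ∈ sweepB grid n m safe, landB grid n m c = true ∧ Reach grid n m c := by
        intro c hc
        obtain ⟨_, hlc, hr⟩ := mem_sweepB.mp hc
        refine ⟨hlc, ?_⟩
        rcases hr with h | ⟨d, hd, hds⟩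
        · exact (hlr c h).2
        · exact Reach.step d c (hlr d hds).2 (nbrs_symm hd) hlc
      have hgseed : ∀ c : Int × Int, landB grid n m c = true →
          (c.1 = 0 ∨ c.1 = n - 1 ∨ c.2 = 0 ∨ c.2 = m - 1) → c ∈ sweepB grid n m safe :=
        fun c hlc hs => hsub c (hseed c hlc hs)
      have hgfuel : n.toNat * m.toNat + 1 ≤ fuel + (sweepB grid n m safe).length := by
        have hlt : safe.length < (sweepB grid n m safe).length :=
          lt_of_le_of_ne hsubperm.length_le (fun h => hlen h.symm)
        omega
      rw [hloop]
      exact ih (sweepB grid n m safe) sweepB_nodup hglr hgseed hgfuel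

lemma reach_min (grid : List (List Int)) (n m : Int) (S : Int × Int → Prop)
    (hseed : ∀ c : Int × Int, landB grid n m c = true →
      (c.1 = 0 ∨ c.1 = n - 1 ∨ c.2 = 0 ∨ c.2 = m - 1) → S c)
    (hstep : ∀ c d : Int × Int, S c → d ∈ nbrs c → landB grid n m d = true → S d) :
    ∀ c : Int × Int, Reach grid n m c → S c := by
  intro c h
  induction h with
  | seed c hl hs => exact hseed c hl hs
  | step c d _ hd hl ihc => exact hstep c d ihc hd hl

lemma countP_split {α : Type} (l : List α) (p q : α → Bool) :
    l.countP p = l.countP (fun x => p x && q x) + l.countP (fun x => p x && !q x) := by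
  induction l with
  | nil => simp
  | cons x xs ih =>
    simp only [List.countP_cons]
    by_cases hp : p x <;> by_cases hq : q x <;> simp [hp, hq] <;> omega

def seedP (grid : List (List Int)) (n m : Int) (c : Int × Int) : Bool :=
  aGet1 grid c.1 c.2 && decide (c.1 = 0 ∨ c.1 = n - 1 ∨ c.2 = 0 ∨ c.2 = m - 1)

def stepInitA (grid : List (List Int)) (n m : Int)
    (st : Int × List (Int × Int) × PySem.Set (Int × Int)) (c : Int × Int) :
    Int × List (Int × Int) × PySem.Set (Int × Int) :=
  if aGet1 grid c.1 c.2 then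
    let st := (st.1 + 1, st.2.1, st.2.2)
    if c.1 = 0 ∨ c.1 = n - 1 ∨ c.2 = 0 ∨ c.2 = m - 1 then
      (st.1, st.2.1 ++ [c], PySem.Set.add st.2.2 c)
    else st
  else st

lemma initA_eq (grid : List (List Int)) (n m : Int)
    (init : Int × List (Int × Int) × PySem.Set (Int × Int)) :
    (PySem.List.pyRange 0 n 1).foldl (fun st i =>
        (PySem.List.pyRange 0 m 1).foldl
          (fun (st : Int × List (Int × Int) × PySem.Set (Int × Int)) j =>
            if aGet1 grid i j then
              let st := (st.1 + 1, st.2.1, st.2.2)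
              if i = 0 ∨ i = n - 1 ∨ j = 0 ∨ j = m - 1 then
                (st.1, st.2.1 ++ [(i, j)], PySem.Set.add st.2.2 (i, j))
              else st
            else st) st) init
      = (allCellsB n m).foldl (stepInitA grid n m) init := by
  rw [allCellsB, List.foldl_flatMap]
  simp only [List.foldl_map]
  rfl

lemma initA_char (grid : List (List Int)) (n m : Int) :
    ∀ (cs : List (Int × Int)) (k : Int) (s : List (Int × Int)),
    cs.Nodup → (∀ c ∈ cs, c ∉ s) →
    cs.foldl (stepInitA grid n m) (k, s, s)
      = (k + (cs.countP (fun c => aGet1 grid c.1 c.2) : Int),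
         s ++ cs.filter (seedP grid n m), s ++ cs.filter (seedP grid n m)) := by
  intro cs
  induction cs with
  | nil => intro k s _ _; simp
  | cons c cs ih =>
    intro k s hnd hdisj
    have hcs : c ∉ s := hdisj c List.mem_cons_self
    have hnd' : cs.Nodup := hnd.of_cons
    rw [List.foldl_cons]
    by_cases hg : aGet1 grid c.1 c.2 = true
    · by_cases hsd : c.1 = 0 ∨ c.1 = n - 1 ∨ c.2 = 0 ∨ c.2 = m - 1
      · have hstep : stepInitA grid n m (k, s, s) c = (k + 1, s ++ [c], s ++ [c]) := by
          simp only [stepInitA, hg, if_true, hsd]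
          rw [set_add_fresh s c hcs]
        rw [hstep]
        have hdisj' : ∀ c' ∈ cs, c' ∉ s ++ [c] := by
          intro c' hc' hmem
          rcases List.mem_append.mp hmem with h | h
          · exact hdisj c' (List.mem_cons_of_mem _ hc') h
          · rcases List.mem_singleton.mp h with rfl
            exact (List.nodup_cons.mp hnd).1 hc'
        rw [ih (k + 1) (s ++ [c]) hnd' hdisj']
        have hseedc : seedP grid n m c = true := by
          simp [seedP, hg, hsd]
        simp only [List.countP_cons, List.filter_cons, hseedc, if_true, hg,
          List.append_assoc, List.singleton_append, Prod.mk.injEq]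
        exact ⟨by push_cast; ring, trivial⟩
      · have hstep : stepInitA grid n m (k, s, s) c = (k + 1, s, s) := by
          simp only [stepInitA, hg, if_true, hsd, if_false]
        rw [hstep, ih (k + 1) s hnd' (fun c' hc' => hdisj c' (List.mem_cons_of_mem _ hc'))]
        have hseedc : seedP grid n m c = false := by
          simp [seedP, hsd]
        simp only [List.countP_cons, List.filter_cons, hseedc, hg, if_true,
          Bool.false_eq_true, if_false, Prod.mk.injEq]
        exact ⟨by push_cast; ring, trivial⟩
    · have hstep : stepInitA grid n m (k, s, s) c = (k, s, s) := by
        simp only [stepInitA, hg]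
        simp
      rw [hstep, ih k s hnd' (fun c' hc' => hdisj c' (List.mem_cons_of_mem _ hc'))]
      have hseedc : seedP grid n m c = false := by
        simp only [seedP, Bool.and_eq_false_iff]
        left; simpa using hg
      simp only [List.countP_cons, List.filter_cons, hseedc, hg]
      simp

lemma main_eq (grid : List (List Int)) :
    count_enclosed_land_cells grid = count_enclosed_land_cells_alt grid := by
  cases grid with
  | nil => rfl
  | cons r0 gs =>
    have hget : PySem.List.pyGet? (r0 :: gs) (0 : Int) = some r0 :=
      PySem.List.pyGet?_zero_cons r0 gs
    simp only [count_enclosed_land_cells, count_enclosed_land_cells_alt, hget]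
    set G := r0 :: gs with hG
    set n : Int := ((r0 :: gs).length : Int) with hn
    set m : Int := (r0.length : Int) with hm
    have hempty : (PySem.Set.empty : PySem.Set (Int × Int)) = ([] : List (Int × Int)) := rfl
    rw [hempty, initA_eq,
      initA_char G n m (allCellsB n m) 0 [] nodup_allCellsB (by simp), List.nil_append]
    -- the seeds list
    set s0 : List (Int × Int) := (allCellsB n m).filter (seedP G n m) with hs0
    have hs0nd : s0.Nodup := nodup_allCellsB.filter _
    have hs0mem : ∀ c : Int × Int, c ∈ s0 ↔
        (c ∈ allCellsB n m ∧ seedP G n m c = true) := fun c => List.mem_filter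
    have hs0lr : ∀ c ∈ s0, landB G n m c = true ∧ Reach G n m c := by
      intro c hc
      obtain ⟨hca, hcs⟩ := (hs0mem c).mp hc
      obtain ⟨h1, h2, h3, h4⟩ := mem_allCellsB.mp hca
      simp only [seedP, Bool.and_eq_true, decide_eq_true_eq] at hcs
      have hland : landB G n m c = true := by
        rw [landB_eq_aGet1 h1 h2 h3 h4]; exact hcs.1
      exact ⟨hland, Reach.seed c hland hcs.2⟩
    have hseed_in_s0 : ∀ c : Int × Int, landB G n m c = true →
        (c.1 = 0 ∨ c.1 = n - 1 ∨ c.2 = 0 ∨ c.2 = m - 1) → c ∈ s0 := by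
      intro c hlc hsd
      obtain ⟨h1, h2, h3, h4⟩ := land_inRange hlc
      refine (hs0mem c).mpr ⟨mem_allCellsB.mpr ⟨h1, h2, h3, h4⟩, ?_⟩
      simp only [seedP, Bool.and_eq_true, decide_eq_true_eq]
      exact ⟨(landB_eq_aGet1 h1 h2 h3 h4) ▸ hlc, hsd⟩
    obtain ⟨w, hwnd, hwlr, hvw, hwcl, hweq⟩ :=
      bfsA_spec G n m (n.toNat * m.toNat + 1)
        (0 + ((allCellsB n m).countP (fun c => aGet1 G c.1 c.2) : Int)) s0 s0
        hs0nd hs0lr (fun c hc => hc) (fun c hc hnc => absurd hc hnc) (by omega)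
    rw [hweq]
    -- B side
    have hsafe0 : PySem.Set.ofList ((allCellsB n m).filter (fun c =>
        landB G n m c && (c.1 == 0 || c.1 == n - 1 || c.2 == 0 || c.2 == m - 1))) = s0 := by
      rw [hs0]
      have hcongr : (allCellsB n m).filter (fun c =>
          landB G n m c && (c.1 == 0 || c.1 == n - 1 || c.2 == 0 || c.2 == m - 1))
          = (allCellsB n m).filter (seedP G n m) := by
        apply List.filter_congr
        intro c hc
        obtain ⟨h1, h2, h3, h4⟩ := mem_allCellsB.mp hc
        rw [seedP, landB_eq_aGet1 h1 h2 h3 h4, Bool.beq_eq_decide_eq, Bool.beq_eq_decide_eq,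
          Bool.beq_eq_decide_eq, Bool.beq_eq_decide_eq, Bool.decide_or, Bool.decide_or,
          Bool.decide_or]
        simp [Bool.or_assoc]
      rw [hcongr]
      exact PySem.Set.ofList_eq_self_of_nodup _ (nodup_allCellsB.filter _)
    rw [hsafe0]
    obtain ⟨hRnd, hRlr, hRseed, hRcl⟩ :=
      loopB_spec G n m (n.toNat * m.toNat + 1) s0 hs0nd hs0lr hseed_in_s0 (by omega)
    set R : List (Int × Int) := loopB G n m (n.toNat * m.toNat + 1) s0 with hR
    rw [PySem.List.foldl_count_if (fun c => landB G n m c && !(PySem.Set.contains R c))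
      (allCellsB n m) 0]
    -- membership equivalences
    have hmemwR : ∀ c : Int × Int, c ∈ w ↔ c ∈ R := by
      intro c
      constructor
      · intro hc
        refine reach_min G n m (· ∈ R) hRseed ?_ c (hwlr c hc).2
        intro a d ha hd hld
        exact hRcl d hld ⟨a, nbrs_symm hd, ha⟩
      · intro hc
        refine reach_min G n m (· ∈ w) ?_ ?_ c (hRlr c hc).2
        · intro a hla hsa
          exact hvw a (hseed_in_s0 a hla hsa)
        · intro a d ha hd hld
          exact hwcl a ha d hd hld
    have hwR : w.Perm R := (List.perm_ext_iff_of_nodup hwnd hRnd).mpr hmemwR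
    -- counting
    have hcnt1 : (allCellsB n m).countP (fun c => aGet1 G c.1 c.2)
        = (allCellsB n m).countP (landB G n m) := by
      apply List.countP_congr
      intro c hc
      obtain ⟨h1, h2, h3, h4⟩ := mem_allCellsB.mp hc
      rw [landB_eq_aGet1 h1 h2 h3 h4]
    have hcnt2 := countP_split (allCellsB n m) (landB G n m)
      (fun c => PySem.Set.contains R c)
    have hcnt3 : (allCellsB n m).countP
        (fun c => landB G n m c && PySem.Set.contains R c) = R.length := by
      rw [List.countP_eq_length_filter]
      apply List.Perm.length_eq
      apply (List.perm_ext_iff_of_nodup (nodup_allCellsB.filter _) hRnd).mpr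
      intro c
      rw [List.mem_filter, Bool.and_eq_true, set_mem_contains]
      constructor
      · exact fun h => h.2.2
      · intro hc
        exact ⟨mem_allCellsB.mpr (land_inRange (hRlr c hc).1), (hRlr c hc).1, hc⟩
    have hwlen : w.length = R.length := hwR.length_eq
    rw [hcnt1, hcnt2, hcnt3, hwlen]
    push_cast
    ring

-- ===== VERDICT (by name: the statement is the Claim_ definition above) =====
theorem count_enclosed_land_cells_spec : Claim_equal_count_enclosed_land_cells := by
  intro grid _ _
  show count_enclosed_land_cells grid = count_enclosed_land_cells_alt grid
  exact main_eq grid
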